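-- pv_equiv track=rewrite | github.com/ktzevel/SOLO | mesh-reconstruction/post_process_avg.py | find_first_last_ones
-- ===== SOURCE A (Python) =====
-- def find_first_last_ones(arr):
--     '''
--     This function finds the index of first and last 1 in arr
--     '''
--     first_one_index = None
--     last_one_index = None
--
--     for idx, value in enumerate(arr):
--         if value == 1:
--             if first_one_index is None:
--                 first_one_index = idx
--             last_one_index = idx
--
--     return first_one_index, last_one_index
-- ===== SOURCE B (Python) =====
-- def find_first_last_ones(arr):
--     '''
--     This function finds the index of first and last 1 in arr
--     '''
--     first_one_index = None
--     for idx, value in enumerate(arr):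
--         if value == 1:
--             first_one_index = idx
--             break
--
--     last_one_index = None
--     for ridx, value in enumerate(reversed(arr)):
--         if value == 1:
--             last_one_index = len(arr) - 1 - ridx
--             break
--
--     return first_one_index, last_one_index
-- ===== Notes on version B (the rewrite author's own statement) =====
-- stated objective: alternative
-- what changed: Replaces the single combined loop that maintains both indices across the whole list with two early-exiting directed searches: a forward scan for the first 1 and a backward scan over reversed(arr) for the last 1.
import Mathlib
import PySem

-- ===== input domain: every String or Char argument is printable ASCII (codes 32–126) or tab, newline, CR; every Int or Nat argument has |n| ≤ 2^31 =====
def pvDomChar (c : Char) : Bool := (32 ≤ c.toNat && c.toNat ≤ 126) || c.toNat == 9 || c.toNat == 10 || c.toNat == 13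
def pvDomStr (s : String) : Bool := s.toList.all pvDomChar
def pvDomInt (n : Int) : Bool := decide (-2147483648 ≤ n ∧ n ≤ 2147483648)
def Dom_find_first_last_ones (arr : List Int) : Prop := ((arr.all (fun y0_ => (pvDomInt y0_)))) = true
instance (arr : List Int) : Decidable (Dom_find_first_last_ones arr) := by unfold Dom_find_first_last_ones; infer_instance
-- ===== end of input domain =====

-- B replaces A's single combined loop with two early-exiting directed searches
-- (forward for the first 1, backward over the reversed list for the last 1); objective: alternative decomposition.


-- ===== PORT A =====
-- A's single loop over enumerate(arr), carrying (first_one_index, last_one_index).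
def pvLoopA : List (Int × Int) → Option Int × Option Int → Option Int × Option Int
  | [], st => st
  | (idx, v) :: t, (f, l) =>
      if v == 1 then pvLoopA t ((if f.isNone then some idx else f), some idx)
      else pvLoopA t (f, l)

def find_first_last_ones (arr : List Int) : Option Int × Option Int :=
  pvLoopA (PySem.List.enumerate arr) (none, none)

-- ===== PORT B =====
-- forward scan: first index i (starting from counter s) with value == 1
def pvFirstOne : List Int → Int → Option Int
  | [], _ => none
  | v :: t, s => if v == 1 then some s else pvFirstOne t (s + 1)

def find_first_last_ones_alt (arr : List Int) : Option Int × Option Int :=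
  let first_one_index := pvFirstOne arr 0
  let last_one_index :=
    (pvFirstOne arr.reverse 0).map (fun ridx => (arr.length : Int) - 1 - ridx)
  (first_one_index, last_one_index)

-- ===== PRECONDITION & SPEC =====
def Spec_find_first_last_ones (arr : List Int) (out : Option Int × Option Int) : Prop := out = find_first_last_ones_alt arr
instance (arr : List Int) (out : Option Int × Option Int) : Decidable (Spec_find_first_last_ones arr out) := by unfold Spec_find_first_last_ones; infer_instance

-- ===== CLAIM (what is proved, stated in full; the proofs are below) =====
def Claim_equal_find_first_last_ones : Prop := ∀ (arr : List Int), Dom_find_first_last_ones arr → Spec_find_first_last_ones arr (find_first_last_ones arr)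

-- ===== LEMMAS AND PROOFS =====

-- last index ≥ s with value == 1, written as a forward recursion (proof-only helper)
def pvLastOne : List Int → Int → Option Int
  | [], _ => none
  | v :: t, s => (pvLastOne t (s + 1)).orElse (fun _ => if v == 1 then some s else none)

theorem pvLoopA_char (arr : List Int) : ∀ (s : Int) (f l : Option Int),
    pvLoopA (PySem.List.enumerate arr s) (f, l)
      = (f.orElse (fun _ => pvFirstOne arr s), (pvLastOne arr s).orElse (fun _ => l)) := by
  induction arr with
  | nil => intro s f l; simp [PySem.List.enumerate_nil, pvLoopA, pvFirstOne, pvLastOne]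
  | cons v t ih =>
    intro s f l
    simp only [PySem.List.enumerate_cons, pvLoopA, pvFirstOne, pvLastOne]
    by_cases hv : v == 1
    · simp only [hv, if_pos, ih]
      cases f <;> cases pvLastOne t (s + 1) <;> simp [Option.orElse, Option.isNone]
    · simp only [hv, ih, Bool.false_eq_true, if_false]
      cases pvLastOne t (s + 1) <;> simp [Option.orElse]

theorem pvFirstOne_append (a b : List Int) : ∀ (s : Int),
    pvFirstOne (a ++ b) s = (pvFirstOne a s).orElse (fun _ => pvFirstOne b (s + a.length)) := by
  induction a with
  | nil => intro s; simp [pvFirstOne, Option.orElse]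
  | cons v t ih =>
    intro s
    simp only [List.cons_append, pvFirstOne, ih]
    by_cases hv : v == 1
    · simp [hv, Option.orElse]
    · have harg : s + 1 + ((t.length : Int)) = s + (((v :: t).length : Int)) := by
        simp; push_cast; ring
      simp only [hv, Bool.false_eq_true, if_false, harg]

theorem pvLastOne_eq_rev (arr : List Int) : ∀ (s : Int),
    pvLastOne arr s = (pvFirstOne arr.reverse 0).map (fun r => s + (arr.length : Int) - 1 - r) := by
  induction arr with
  | nil => intro s; simp [pvLastOne, pvFirstOne]
  | cons v t ih =>
    intro s
    simp only [pvLastOne, List.reverse_cons, pvFirstOne_append, ih, pvFirstOne]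
    cases hf : pvFirstOne t.reverse 0 with
    | none =>
      by_cases hv : v == 1 <;>
        simp [hv, Option.orElse, List.length_reverse] <;> omega
    | some r =>
      simp only [Option.orElse, Option.map_some, List.length_cons]
      congr 1
      push_cast
      omega

-- ===== VERDICT (by name: the statement is the Claim_ definition above) =====
theorem find_first_last_ones_spec : Claim_equal_find_first_last_ones := by
  intro arr _
  unfold Spec_find_first_last_ones find_first_last_ones find_first_last_ones_alt
  rw [pvLoopA_char, pvLastOne_eq_rev]
  cases pvFirstOne arr.reverse 0 <;>
    simp [Option.orElse]
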